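-- pv_equiv track=rewrite | github.com/vterreno/ejercicios-curso-python | Ejercicios/Ejercicio #12 - Volumen 1 - 163 - Súmale 1/Volumen 1 - 163 - Súmale 1.py | hex_siguiente
-- ===== SOURCE A (Python) =====
-- def hex_siguiente(cadena):
--     #INICIALIZACIÓN DE VARIABLES
--
--     in_usuario = "0" + cadena           #Añadimos un 0 a la izquierda para los números cuyos dígitos son todos F
--     in_usuario = in_usuario.upper()
--     caracteres = "0123456789ABCDEF"
--
--     capacidad_vector = 100
--     vector_F = capacidad_vector * [0]
--     contador = 0
--
--     #PROCESOS
--     if in_usuario[len(in_usuario)-1 : len(in_usuario)] != "F":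
--
--         #Si el último caracter NO es una F, lo aumentamos en 1.
--         for i in range(len(caracteres)):
--             if in_usuario[len(in_usuario)-1 : len(in_usuario)] == caracteres[i : i+1]:
--                 pos_encontrada = i
--
--         #Concatenamos el nuevo caracter al resto de la cadena
--         in_usuario = in_usuario[0: len(in_usuario)-1] + caracteres[pos_encontrada+1 : pos_encontrada+2]
--         return in_usuario[1 : len(in_usuario)]
--     else:
--         #Si el último caracter es una F significa que tenemos que hacerlo 0 y aumentar en 1 al caracter de su izquierda.
--         #Disminuimos en 1 la cadena ingresada para que no se tome al último caracter, que será un 0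
--         in_usuario = hex_siguiente(in_usuario[0 : len(in_usuario)-1]) + "0"
--
--         return in_usuario[1 : len(in_usuario)]
-- ===== SOURCE B (Python) =====
-- def hex_siguiente(cadena):
--     u = cadena.upper()
--     sin_f = u.rstrip('F')                  # drop the trailing run of F's
--     if not sin_f:
--         return '0' * len(u)                # all F (or empty): wraps around to all zeros
--     c = sin_f[-1]
--     bumped = 'A' if c == '9' else chr(ord(c) + 1)
--     return sin_f[:-1] + bumped + '0' * (len(u) - len(sin_f))
-- ===== Notes on version B (the rewrite author's own statement) =====
-- stated objective: simpler
-- what changed: A's per-digit recursion (prepend a zero, slice off the last character, 16-iteration scan per recursion level) is replaced by a non-recursive closed-form splice: one rstrip of the trailing run of top digits, a code-point-arithmetic bump (chr(ord(c)+1), with one special case at the nine-to-A boundary) of the last remaining character, and zero-padding back to length; asymptotically faster when many digits carry; Pre_ excludes exactly the inputs where A raises UnboundLocalError.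
import Mathlib
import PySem

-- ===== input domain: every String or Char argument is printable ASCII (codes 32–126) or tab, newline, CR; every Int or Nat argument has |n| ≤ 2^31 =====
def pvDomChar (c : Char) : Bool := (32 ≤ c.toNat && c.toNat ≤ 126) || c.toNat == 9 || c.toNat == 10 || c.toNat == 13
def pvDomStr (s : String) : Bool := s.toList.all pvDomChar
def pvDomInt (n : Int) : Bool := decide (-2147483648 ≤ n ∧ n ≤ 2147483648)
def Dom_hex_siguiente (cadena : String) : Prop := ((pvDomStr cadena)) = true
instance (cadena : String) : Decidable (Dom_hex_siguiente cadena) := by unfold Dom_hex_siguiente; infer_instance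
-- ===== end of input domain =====

-- B replaces A's per-digit recursion by a non-recursive closed-form splice (rstrip the trailing run
-- of top digits, bump one character by code-point arithmetic, pad with zeros); equal wherever A
-- returns (Pre_ excludes exactly the inputs where A raises UnboundLocalError).

-- ===== PORT A =====
-- A's string operations are ported on `cadena.toList` (PySem.List slices on List Char, exact per PYSEM.md).
def pvCaracteres : List Char := ['0','1','2','3','4','5','6','7','8','9','A','B','C','D','E','F']

-- count of leading top-digit characters (F) of the reversed uppercased input: A's termination measure
def pvTrailF : List Char → Nat
  | [] => 0
  | c :: r => if c = 'F' then pvTrailF r + 1 else 0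

-- in_usuario after the first two statements of A: "0" + cadena, uppercased
def pvInU (l : List Char) : List Char := PySem.Chars.upper ('0' :: l)

lemma pvUpperChar_idem (c : Char) : PySem.Chars.upperChar (PySem.Chars.upperChar c) = PySem.Chars.upperChar c := by
  simp only [PySem.Chars.upperChar, PySem.Chars.islower]
  by_cases h : 'a' ≤ c ∧ c ≤ 'z'
  · have h1 : 97 ≤ c.toNat ∧ c.toNat ≤ 122 := by
      constructor <;> [exact h.1; exact h.2]
    have hv : (c.toNat - 32).isValidChar := Or.inl (by omega)
    have ht : (Char.ofNat (c.toNat - 32)).toNat = c.toNat - 32 := by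
      rw [Char.toNat_ofNat, if_pos hv]
    have hno : ¬ ('a' ≤ Char.ofNat (c.toNat - 32) ∧ Char.ofNat (c.toNat - 32) ≤ 'z') := by
      intro hc
      have : 97 ≤ (Char.ofNat (c.toNat - 32)).toNat := hc.1
      omega
    simp [h, hno]
  · simp [h]

lemma pvUpper_idem (l : List Char) : PySem.Chars.upper (PySem.Chars.upper l) = PySem.Chars.upper l := by
  simp [PySem.Chars.upper, List.map_map, Function.comp_def, pvUpperChar_idem]

lemma pvInU_eq (l : List Char) : pvInU l = '0' :: PySem.Chars.upper l := by
  simp [pvInU, PySem.Chars.upper, show PySem.Chars.upperChar '0' = '0' from rfl]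

lemma pvSlice_last (w : List Char) (d : Char) :
    PySem.List.slice (w ++ [d]) (some (((w ++ [d]).length : Int) - 1)) (some ((w ++ [d]).length : Int)) = [d] := by
  rw [PySem.List.slice_toNat _ (by simp) (by positivity)]
  have h1 : (((w ++ [d]).length : Int) - 1).toNat = w.length := by simp
  have h2 : (((w ++ [d]).length : Int)).toNat = w.length + 1 := by simp
  rw [h1, h2, Nat.add_sub_cancel_left, List.drop_left]
  simp

lemma pvSlice_init (w : List Char) (d : Char) :
    PySem.List.slice (w ++ [d]) (some 0) (some (((w ++ [d]).length : Int) - 1)) = w := by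
  rw [PySem.List.slice_zero_start, PySem.List.slice_to _ (by simp)]
  have h1 : (((w ++ [d]).length : Int) - 1).toNat = w.length := by simp
  rw [h1, List.take_left]

lemma pvTrailF_append_singleton (xs : List Char) (c : Char) (h : c ≠ 'F') :
    pvTrailF (xs ++ [c]) = pvTrailF xs := by
  induction xs with
  | nil => simp [pvTrailF, h]
  | cons a r ih => by_cases ha : a = 'F' <;> simp [pvTrailF, ha, ih]

lemma pvUpper_eq_append (l w : List Char) (d : Char) (hu : PySem.Chars.upper l = w ++ [d]) :
    PySem.Chars.upper w = w := by
  have h2 := pvUpper_idem l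
  rw [hu] at h2
  have h3 : PySem.Chars.upper w ++ [PySem.Chars.upperChar d] = w ++ [d] := by
    simpa [PySem.Chars.upper] using h2
  exact (List.append_inj h3 (by simp [PySem.Chars.upper])).1

-- the recursive call's argument is "0" + upper(cadena) minus its last character; the measure drops by one
lemma pvMeasure_lt (l : List Char)
    (h : PySem.List.slice (pvInU l) (some (((pvInU l).length : Int) - 1)) (some ((pvInU l).length : Int)) = ['F']) :
    pvTrailF ((PySem.Chars.upper (PySem.List.slice (pvInU l) (some 0) (some (((pvInU l).length : Int) - 1)))).reverse)
      < pvTrailF ((PySem.Chars.upper l).reverse) := by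
  rcases List.eq_nil_or_concat (PySem.Chars.upper l) with hu | ⟨w, d, hu⟩
  · rw [pvInU_eq, hu] at h
    exact absurd h (by decide)
  · rw [List.concat_eq_append] at hu
    have hInU : pvInU l = ('0' :: w) ++ [d] := by rw [pvInU_eq, hu]; simp
    rw [hInU, pvSlice_last] at h
    have hd : d = 'F' := by simpa using h
    have hw : PySem.Chars.upper w = w := pvUpper_eq_append l w d hu
    have h5 : PySem.Chars.upper ('0' :: w) = '0' :: w := by
      rw [show PySem.Chars.upper ('0' :: w) = pvInU w from rfl, pvInU_eq, hw]
    rw [hInU, pvSlice_init, hu, h5, hd]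
    rw [List.reverse_cons, List.reverse_append, pvTrailF_append_singleton _ '0' (by decide)]
    simp [pvTrailF]

def pvHexA (l : List Char) : List Char :=
  -- in_usuario = ("0" + cadena).upper()  =  pvInU l
  if hne : PySem.List.slice (pvInU l) (some (((pvInU l).length : Int) - 1)) (some ((pvInU l).length : Int)) ≠ ['F'] then
    -- for i in range(len(caracteres)): if in_usuario[-1:] == caracteres[i:i+1]: pos_encontrada = i
    match (PySem.List.pyRange 0 ((pvCaracteres.length : Int)) 1).foldl
        (fun acc i => if PySem.List.slice (pvInU l) (some (((pvInU l).length : Int) - 1)) (some ((pvInU l).length : Int))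
                        = PySem.List.slice pvCaracteres (some i) (some (i + 1)) then some i else acc)
        (none : Option Int) with
    | none => []   -- pos_encontrada unbound: Python raises UnboundLocalError here; excluded by Pre_
    | some p =>
      let r := PySem.List.slice (pvInU l) (some 0) (some (((pvInU l).length : Int) - 1))
                 ++ PySem.List.slice pvCaracteres (some (p + 1)) (some (p + 2))
      PySem.List.slice r (some 1) (some ((r.length : Int)))
  else
    let r := pvHexA (PySem.List.slice (pvInU l) (some 0) (some (((pvInU l).length : Int) - 1))) ++ ['0']
    PySem.List.slice r (some 1) (some ((r.length : Int)))
termination_by pvTrailF ((PySem.Chars.upper l).reverse)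
decreasing_by exact pvMeasure_lt l (not_not.mp hne)

def hex_siguiente (cadena : String) : String := String.ofList (pvHexA cadena.toList)

-- ===== PORT B =====
-- u.rstrip('F'), ported by hand (PySem has no rstrip-with-argument): drop the trailing run of top digits
def pvRstripF (u : List Char) : List Char := (u.reverse.dropWhile (fun c => c == 'F')).reverse

-- 'A' if c == '9' else chr(ord(c) + 1) — chr/ord exact on Dom (code points ≤ 126)
def pvNextChar (c : Char) : Char := if c = '9' then 'A' else Char.ofNat (c.toNat + 1)

def pvB (l : List Char) : List Char :=
  let u := PySem.Chars.upper l
  let s := pvRstripF u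
  if h : s = [] then List.replicate u.length '0'
  else s.dropLast ++ [pvNextChar (s.getLast h)] ++ List.replicate (u.length - s.length) '0'
  -- sin_f[:-1] and sin_f[-1] on the (nonempty) sin_f; '0' * (len(u) - len(sin_f))

def hex_siguiente_alt (cadena : String) : String := String.ofList (pvB cadena.toList)

-- ===== PRECONDITION & SPEC =====
-- the fifteen hex digits below the top digit F
def pvNF : List Char := ['0','1','2','3','4','5','6','7','8','9','A','B','C','D','E']

-- Pre_ excludes exactly the inputs on which A raises UnboundLocalError (and nothing A returns on):
-- the rightmost character of the uppercased input that is below the top digit, when it exists, must be a hex digit.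
def Pre_hex_siguiente (cadena : String) : Prop :=
  (((PySem.Chars.upper cadena.toList).reverse.dropWhile (fun c => c == 'F')).head?.all
    (fun c => pvNF.contains c)) = true
instance (cadena : String) : Decidable (Pre_hex_siguiente cadena) := by unfold Pre_hex_siguiente; infer_instance

def pvWitness_hex_siguiente : String := "a9F"

def Spec_hex_siguiente (cadena : String) (out : String) : Prop := out = hex_siguiente_alt cadena
instance (cadena : String) (out : String) : Decidable (Spec_hex_siguiente cadena out) := by unfold Spec_hex_siguiente; infer_instance

-- ===== CLAIM (what is proved, stated in full; the proofs are below) =====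
def Claim_equal_hex_siguiente : Prop := ∀ (cadena : String), Dom_hex_siguiente cadena → Pre_hex_siguiente cadena → Spec_hex_siguiente cadena (hex_siguiente cadena)

-- ===== LEMMAS AND PROOFS =====

lemma pvB_eq (l : List Char) :
    pvB l = if h : pvRstripF (PySem.Chars.upper l) = []
            then List.replicate (PySem.Chars.upper l).length '0'
            else (pvRstripF (PySem.Chars.upper l)).dropLast
                 ++ [pvNextChar ((pvRstripF (PySem.Chars.upper l)).getLast h)]
                 ++ List.replicate ((PySem.Chars.upper l).length - (pvRstripF (PySem.Chars.upper l)).length) '0' := rfl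

lemma pvSlice_tail (xs : List Char) :
    PySem.List.slice xs (some 1) (some ((xs.length : Int))) = xs.tail := by
  rw [PySem.List.slice_toNat _ (by norm_num) (by positivity)]
  simp only [Int.toNat_one, Int.toNat_natCast, List.drop_one]
  exact List.take_of_length_le (by simp [List.length_tail])

-- A's 16-iteration scan and its bump slice, versus B's character arithmetic, digit by digit
lemma pvScan (d : Char) (hd : d ∈ pvNF) :
    ∃ p : Int, (PySem.List.pyRange 0 ((pvCaracteres.length : Int)) 1).foldl
        (fun acc i => if [d] = PySem.List.slice pvCaracteres (some i) (some (i + 1)) then some i else acc)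
        (none : Option Int) = some p
    ∧ PySem.List.slice pvCaracteres (some (p + 1)) (some (p + 2)) = [pvNextChar d] := by
  fin_cases hd
  · exact ⟨0, by decide, by decide⟩
  · exact ⟨1, by decide, by decide⟩
  · exact ⟨2, by decide, by decide⟩
  · exact ⟨3, by decide, by decide⟩
  · exact ⟨4, by decide, by decide⟩
  · exact ⟨5, by decide, by decide⟩
  · exact ⟨6, by decide, by decide⟩
  · exact ⟨7, by decide, by decide⟩
  · exact ⟨8, by decide, by decide⟩
  · exact ⟨9, by decide, by decide⟩
  · exact ⟨10, by decide, by decide⟩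
  · exact ⟨11, by decide, by decide⟩
  · exact ⟨12, by decide, by decide⟩
  · exact ⟨13, by decide, by decide⟩
  · exact ⟨14, by decide, by decide⟩

lemma pvUpper_cons0 (w : List Char) (hw : PySem.Chars.upper w = w) :
    PySem.Chars.upper ('0' :: w) = '0' :: w := by
  rw [show PySem.Chars.upper ('0' :: w) = pvInU w from rfl, pvInU_eq, hw]

lemma pvSlice_drop1 (xs : List Char) (b : Int) (hb : (xs.length : Int) ≤ b) :
    PySem.List.slice xs (some 1) (some b) = xs.tail := by
  rw [PySem.List.slice_toNat _ (by norm_num) (le_trans (by positivity) hb)]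
  rw [Int.toNat_one, List.drop_one]
  exact List.take_of_length_le (by simp [List.length_tail]; omega)

lemma pvMainNil (l : List Char) (hu : PySem.Chars.upper l = []) :
    pvHexA l = pvB l := by
  have hl : l = [] := by
    have h2 := hu
    simp only [PySem.Chars.upper, List.map_eq_nil_iff] at h2
    exact h2
  subst hl
  rw [pvHexA.eq_def]; decide

-- B on an uppercased value whose last character d is below the top digit: the rstrip strips nothing
lemma pvB_then (l w : List Char) (d : Char) (hu : PySem.Chars.upper l = w ++ [d]) (hdF : d ≠ 'F') :
    pvB l = w ++ [pvNextChar d] := by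
  have hs : pvRstripF (w ++ [d]) = w ++ [d] := by
    unfold pvRstripF
    rw [List.reverse_append]
    simp [hdF]
  rw [pvB_eq, hu, hs]
  rw [dif_neg (by simp)]
  simp

lemma pvMainThen (l w : List Char) (d : Char) (hu : PySem.Chars.upper l = w ++ [d]) (hdF : d ≠ 'F')
    (hd : d ∈ pvNF) :
    pvHexA l = pvB l := by
  have hInU : pvInU l = ('0' :: w) ++ [d] := by rw [pvInU_eq, hu]; simp
  obtain ⟨p, hfold, hslice2⟩ := pvScan d hd
  rw [pvHexA.eq_def]
  simp only [hInU, pvSlice_last, pvSlice_init]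
  rw [dif_pos (by simpa using hdF)]
  rw [hfold]
  simp only [List.cons_append]
  rw [pvSlice_drop1 _ _ (by simp), hslice2]
  rw [pvB_then l w d hu hdF]
  simp

-- B's value on '0'::w feeds A's recursion: stripping the head '0' and appending '0' gives B on l
lemma pvCore (l w : List Char) (hu : PySem.Chars.upper l = w ++ ['F'])
    (hw : PySem.Chars.upper w = w) :
    List.tail (pvB ('0' :: w) ++ ['0']) = pvB l := by
  have h5 : PySem.Chars.upper ('0' :: w) = '0' :: w := pvUpper_cons0 w hw
  have hql : (w.reverse.dropWhile (fun c => c == 'F')).length ≤ w.length := by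
    calc (w.reverse.dropWhile (fun c => c == 'F')).length ≤ w.reverse.length :=
          List.length_dropWhile_le _ _
      _ = w.length := List.length_reverse
  have hrl : pvRstripF (w ++ ['F']) = pvRstripF w := by
    unfold pvRstripF
    rw [List.reverse_append]
    simp
  have hr0 : ('0' :: w).reverse.dropWhile (fun c => c == 'F')
      = (w.reverse.dropWhile (fun c => c == 'F')) ++ (['0'].dropWhile (fun c => c == 'F')) := by
    rw [List.reverse_cons, List.dropWhile_append]
    by_cases hq : w.reverse.dropWhile (fun c => c == 'F') = []
    · simp [hq]
    · simp [hq]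
  cases hq : w.reverse.dropWhile (fun c => c == 'F') with
  | nil =>
    -- w is all F: B('0'::w) = '1' followed by zeros; B l = all zeros
    have hs0 : pvRstripF ('0' :: w) = ['0'] := by
      unfold pvRstripF; rw [hr0, hq]; decide
    have hsl : pvRstripF (w ++ ['F']) = [] := by
      rw [hrl]; unfold pvRstripF; rw [hq]; rfl
    rw [pvB_eq, pvB_eq, h5, hs0, hu, hsl]
    rw [dif_neg (by decide), dif_pos rfl]
    show List.tail (List.dropLast ['0'] ++ [pvNextChar '0'] ++ List.replicate (w.length + 1 - 1) '0' ++ ['0'])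
        = List.replicate (w ++ ['F']).length '0'
    simp [pvNextChar, List.replicate_succ']
  | cons c t =>
    -- w has a non-F digit: both sides are dropLast q.reverse ++ [bump] ++ zeros
    have hqne : w.reverse.dropWhile (fun c => c == 'F') ≠ [] := by rw [hq]; simp
    have hs0 : pvRstripF ('0' :: w) = '0' :: pvRstripF w := by
      unfold pvRstripF; rw [hr0]
      simp [hq]
    have hwne : pvRstripF w ≠ [] := by
      unfold pvRstripF; simpa using hqne
    rw [pvB_eq, pvB_eq, h5, hs0, hu, hrl]
    rw [dif_neg (by simp), dif_neg hwne]
    rw [List.getLast_cons hwne]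
    have hlen : (pvRstripF w).length ≤ w.length := by
      unfold pvRstripF; simpa using hql
    rw [List.dropLast_cons_of_ne_nil hwne]
    simp only [List.length_cons, List.length_append, List.length_cons, List.length_nil]
    have h1 : w.length + 1 - ((pvRstripF w).length + 1) = w.length - (pvRstripF w).length := by omega
    have h2 : (w.length + 0 + 1) - (pvRstripF w).length = (w.length - (pvRstripF w).length) + 1 := by omega
    rw [h1, h2]
    simp [List.replicate_succ']

lemma pvPre_step (r : List Char)
    (hPre : ((List.dropWhile (fun c => c == 'F') r).head?.all (fun c => pvNF.contains c)) = true) :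
    ((List.dropWhile (fun c => c == 'F') (r ++ ['0'])).head?.all (fun c => pvNF.contains c)) = true := by
  rw [List.dropWhile_append]
  cases hq : List.dropWhile (fun c => c == 'F') r with
  | nil => simp [pvNF]
  | cons c t =>
    rw [hq] at hPre
    simpa using hPre

lemma pvTrailF_cons_F (r : List Char) : pvTrailF ('F' :: r) = pvTrailF r + 1 := by
  simp [pvTrailF]

lemma pvMain : ∀ (n : Nat) (l : List Char),
    pvTrailF ((PySem.Chars.upper l).reverse) ≤ n →
    (((PySem.Chars.upper l).reverse.dropWhile (fun c => c == 'F')).head?.all (fun c => pvNF.contains c)) = true →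
    pvHexA l = pvB l := by
  intro n
  induction n with
  | zero =>
    intro l h0 hPre
    rcases List.eq_nil_or_concat (PySem.Chars.upper l) with hu | ⟨w, d, hu⟩
    · exact pvMainNil l hu
    · rw [List.concat_eq_append] at hu
      by_cases hdF : d = 'F'
      · exfalso
        rw [hu, hdF, List.reverse_append] at h0
        simp [pvTrailF] at h0
      · apply pvMainThen l w d hu hdF
        rw [hu, List.reverse_append] at hPre
        simpa [List.dropWhile_cons, hdF] using hPre
  | succ n ih =>
    intro l h0 hPre
    rcases List.eq_nil_or_concat (PySem.Chars.upper l) with hu | ⟨w, d, hu⟩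
    · exact pvMainNil l hu
    · rw [List.concat_eq_append] at hu
      by_cases hdF : d = 'F'
      · subst hdF
        have hw : PySem.Chars.upper w = w := pvUpper_eq_append l w 'F' hu
        have hInU : pvInU l = ('0' :: w) ++ ['F'] := by rw [pvInU_eq, hu]; simp
        have h5 : PySem.Chars.upper ('0' :: w) = '0' :: w := pvUpper_cons0 w hw
        have hPre' : ((List.dropWhile (fun c => c == 'F') w.reverse).head?.all (fun c => pvNF.contains c)) = true := by
          rw [hu, List.reverse_append] at hPre
          simpa [List.dropWhile_cons] using hPre
        have harg : pvHexA ('0' :: w) = pvB ('0' :: w) := by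
          apply ih ('0' :: w) ?hm ?hp
          case hm =>
            rw [h5, List.reverse_cons, pvTrailF_append_singleton _ '0' (by decide)]
            rw [hu, List.reverse_append] at h0
            simp only [List.reverse_cons, List.reverse_nil, List.nil_append, List.singleton_append,
              pvTrailF_cons_F] at h0
            omega
          case hp =>
            rw [h5, List.reverse_cons]
            exact pvPre_step _ hPre'
        rw [pvHexA.eq_def]
        rw [dif_neg (by rw [hInU, pvSlice_last]; simp)]
        simp only [hInU, pvSlice_init, harg, pvSlice_tail]
        exact pvCore l w hu hw
      · apply pvMainThen l w d hu hdF
        rw [hu, List.reverse_append] at hPre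
        simpa [List.dropWhile_cons, hdF] using hPre

-- ===== VERDICT (by name: the statement is the Claim_ definition above) =====
theorem hex_siguiente_spec : Claim_equal_hex_siguiente := by
  intro cadena _ hPre
  unfold Spec_hex_siguiente hex_siguiente hex_siguiente_alt
  exact congrArg String.ofList (pvMain _ cadena.toList le_rfl hPre)
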